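-- pv_equiv track=rewrite | github.com/Ms-211/Algorithm_python | 프로그래머스/unrated/132267. 콜라 문제/콜라 문제.py | solution
-- ===== SOURCE A (Python) =====
-- def solution(a, b, n):
--     cnt = 0
--
--     while n >= a:
--         remain = n % a
--         n = n // a * b
--         cnt += n
--         n += remain
--     return cnt
-- ===== SOURCE B (Python) =====
-- def solution(a, b, n):
--     # Closed form: total bottles gained = b per exchange, (n-b)//(a-b) exchanges in all.
--     if n < a:
--         return 0
--     return (n - b) // (a - b) * b
-- ===== Notes on version B (the rewrite author's own statement) =====
-- stated objective: simpler
-- what changed: Replaces the empty-bottle exchange simulation loop with the closed-form formula (n-b)//(a-b)*b (0 when n<a).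
-- outside the precondition, e.g. on solution(1, -1, 3): A returns -3, B returns -2
import Mathlib
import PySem

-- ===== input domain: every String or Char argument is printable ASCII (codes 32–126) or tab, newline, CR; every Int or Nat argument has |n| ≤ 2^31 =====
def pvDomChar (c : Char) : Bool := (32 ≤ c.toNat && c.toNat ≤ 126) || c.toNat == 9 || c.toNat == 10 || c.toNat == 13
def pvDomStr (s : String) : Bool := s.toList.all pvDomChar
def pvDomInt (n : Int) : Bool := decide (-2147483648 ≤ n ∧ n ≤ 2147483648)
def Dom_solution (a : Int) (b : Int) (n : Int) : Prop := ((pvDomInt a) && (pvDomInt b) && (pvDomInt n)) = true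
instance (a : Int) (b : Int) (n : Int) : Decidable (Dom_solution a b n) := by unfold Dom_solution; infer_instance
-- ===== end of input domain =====

-- B replaces A's exchange-simulation loop by the closed form (n-b)//(a-b)*b (simpler); equal on the natural domain 1 ≤ a, 0 ≤ b < a.


-- ===== PORT A =====
-- the 'while n >= a' loop; fuel only makes the recursion total, each step is A's body verbatim
def solutionLoop (a : Int) (b : Int) : Nat → Int → Int → Int
  | 0, cnt, _ => cnt
  | fuel + 1, cnt, n =>
    if n ≥ a then
      let remain := PySem.Int.mod n a
      let n' := PySem.Int.floordiv n a * b
      solutionLoop a b fuel (cnt + n') (n' + remain)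
    else cnt

def solution (a : Int) (b : Int) (n : Int) : Int :=
  solutionLoop a b (n.toNat + 2) 0 n

-- ===== PORT B =====
def solution_alt (a : Int) (b : Int) (n : Int) : Int :=
  if n < a then 0 else PySem.Int.floordiv (n - b) (a - b) * b

-- ===== PRECONDITION & SPEC =====
-- Pre_ excludes inputs where A diverges or raises (a ≤ b or a ≤ 0, with n ≥ a), and, as the
-- natural domain of the exchange problem, also b < 0 with n ≥ a, where A's one-iteration value
-- (e.g. A(1,-1,3) = -3, B = -2) is an artefact of running the exchange with negative bottles.
def Pre_solution (a : Int) (b : Int) (n : Int) : Prop :=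
  n < a ∨ (1 ≤ a ∧ 0 ≤ b ∧ b < a)
instance (a : Int) (b : Int) (n : Int) : Decidable (Pre_solution a b n) := by
  unfold Pre_solution; infer_instance

def pvWitness_solution : Int × Int × Int := (3, 1, 20)

def Spec_solution (a : Int) (b : Int) (n : Int) (out : Int) : Prop := out = solution_alt a b n
instance (a : Int) (b : Int) (n : Int) (out : Int) : Decidable (Spec_solution a b n out) := by
  unfold Spec_solution; infer_instance

-- ===== CLAIM (what is proved, stated in full; the proofs are below) =====
def Claim_equal_solution : Prop := ∀ (a : Int) (b : Int) (n : Int), Dom_solution a b n → Pre_solution a b n → Spec_solution a b n (solution a b n)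

-- ===== LEMMAS AND PROOFS =====

-- when n < a the loop body never runs, for any fuel
theorem solutionLoop_of_lt (a b : Int) (fuel : Nat) (cnt n : Int) (h : n < a) :
    solutionLoop a b fuel cnt n = cnt := by
  cases fuel with
  | zero => rfl
  | succ f => simp [solutionLoop, not_le.mpr h]

-- loop invariant: with 1 ≤ a, 0 ≤ b < a and enough fuel, the loop adds the closed form
theorem solutionLoop_closed (a b : Int) (ha : 1 ≤ a) (hb0 : 0 ≤ b) (hba : b < a) :
    ∀ (fuel : Nat) (cnt n : Int), a ≤ n → n ≤ (fuel : Int) + a - 1 →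
      solutionLoop a b fuel cnt n = cnt + (n - b) / (a - b) * b := by
  intro fuel
  induction fuel with
  | zero => intro cnt n hn hbound; omega
  | succ f ih =>
    intro cnt n hn hbound
    have ha0 : (0:Int) < a := by omega
    have hq1 : 1 ≤ n / a := by
      rw [Int.le_ediv_iff_mul_le ha0]; omega
    have hr0 : 0 ≤ n % a := Int.emod_nonneg n (by omega)
    have hra : n % a < a := Int.emod_lt_of_pos n ha0
    have hdecomp : a * (n / a) + n % a = n := by
      have := Int.emod_add_mul_ediv n a
      linarith
    set q := n / a with hqdef
    set r := n % a with hrdef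
    have hstep : solutionLoop a b (f+1) cnt n
        = solutionLoop a b f (cnt + q * b) (q * b + r) := by
      simp only [solutionLoop, ge_iff_le, hn, if_pos]
      rw [PySem.Int.mod_eq_emod_of_pos ha0, PySem.Int.floordiv_eq_ediv_of_pos ha0]
    -- key arithmetic identity: (n - b) = ((q*b + r) - b) + q * (a - b)
    have hab : (0:Int) < a - b := by omega
    have hid : (n - b) / (a - b) = ((q * b + r) - b) / (a - b) + q := by
      have : n - b = ((q * b + r) - b) + q * (a - b) := by
        have : a * q + r = n := hdecomp
        ring_nf
        nlinarith [hdecomp]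
      rw [this, Int.add_mul_ediv_right _ _ (by omega : a - b ≠ 0)]
    have hqb : b ≤ q * b := le_mul_of_one_le_left hb0 hq1
    by_cases hcase : a ≤ q * b + r
    · -- still ≥ a: recurse, new n strictly smaller
      have hlt : q * b + r < n := by nlinarith [hdecomp]
      rw [hstep, ih (cnt + q * b) (q * b + r) hcase (by push_cast at hbound ⊢; omega)]
      rw [hid]; ring
    · -- dropped below a: one more (vacuous) check, closed form contributes 0 further
      rw [not_le] at hcase
      rw [hstep, solutionLoop_of_lt a b f _ _ hcase]
      have hz : ((q * b + r) - b) / (a - b) = 0 :=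
        Int.ediv_eq_zero_of_lt (by omega) (by omega)
      rw [hid, hz]; ring

-- ===== VERDICT (by name: the statement is the Claim_ definition above) =====
theorem solution_spec : Claim_equal_solution := by
  intro a b n _ hpre
  unfold Spec_solution solution solution_alt
  rcases lt_or_ge n a with hlt | hge
  · rw [solutionLoop_of_lt a b _ _ _ hlt, if_pos hlt]
  · rcases hpre with hlt | ⟨ha, hb0, hba⟩
    · omega
    · rw [if_neg (not_lt.mpr hge)]
      rw [PySem.Int.floordiv_eq_ediv_of_pos (by omega)]
      have hn0 : 0 ≤ n := by omega
      rw [solutionLoop_closed a b ha hb0 hba (n.toNat + 2) 0 n hge (by omega)]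
      ring
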